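-- pv_equiv track=rewrite | github.com/saram098/hone | miner/arc/advanced_patterns.py | replicate_pattern
-- ===== SOURCE A (Python) =====
-- from typing import List, Dict, Optional, Tuple, Set
--
-- def replicate_pattern(grid: List[List[int]], times_h: int, times_w: int) -> List[List[int]]:
--     """Replicate pattern multiple times"""
--     h, w = len(grid), len(grid[0])
--     result = [[0] * (w * times_w) for _ in range(h * times_h)]
--
--     for rep_i in range(times_h):
--         for rep_j in range(times_w):
--             for i in range(h):
--                 for j in range(w):
--                     result[rep_i * h + i][rep_j * w + j] = grid[i][j]
--
--     return result
-- ===== SOURCE B (Python) =====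
-- def replicate_pattern(grid, times_h, times_w):
--     """Replicate pattern multiple times"""
--     w = len(grid[0])
--     return [row[:w] * times_w for _ in range(times_h) for row in grid]
-- ===== Notes on version B (the rewrite author's own statement) =====
-- stated objective: simpler
-- what changed: Replaces the preallocated zero matrix and quadruple loop of per-cell index-arithmetic assignments with list replication: each row is sliced to the grid width and multiplied by times_w, and the tiled row block is emitted times_h times by a comprehension.
import Mathlib
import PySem

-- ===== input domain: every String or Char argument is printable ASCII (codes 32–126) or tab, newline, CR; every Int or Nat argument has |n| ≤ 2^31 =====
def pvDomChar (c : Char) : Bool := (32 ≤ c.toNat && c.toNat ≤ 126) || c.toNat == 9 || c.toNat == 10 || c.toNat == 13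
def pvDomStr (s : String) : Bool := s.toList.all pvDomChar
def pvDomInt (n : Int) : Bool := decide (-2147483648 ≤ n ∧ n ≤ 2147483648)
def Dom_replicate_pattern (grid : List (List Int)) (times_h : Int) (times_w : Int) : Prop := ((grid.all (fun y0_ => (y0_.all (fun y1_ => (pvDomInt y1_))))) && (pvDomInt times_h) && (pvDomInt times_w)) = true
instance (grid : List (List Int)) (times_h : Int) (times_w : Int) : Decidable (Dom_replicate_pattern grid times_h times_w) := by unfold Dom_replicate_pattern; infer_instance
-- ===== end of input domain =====

-- B builds the tiled grid by list replication (row slice * times_w, row block repeated times_h times)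
-- instead of A's cell-by-cell assignment into a preallocated zero matrix; objective: simpler.

-- ===== PORT A =====
-- literal port of A: allocate a zero matrix, then a quadruple loop of cell assignments;
-- pyGetD/pySetD are exact here because every index the loops use is in range on Pre_ inputs
def replicate_pattern (grid : List (List Int)) (times_h : Int) (times_w : Int) : List (List Int) :=
  let h : Int := PySem.List.len grid
  let w : Int := PySem.List.len ((PySem.List.pyGet? grid 0).getD [])
  let result : List (List Int) :=
    (PySem.List.pyRange 0 (h * times_h) 1).map (fun _ => PySem.List.pyRepeat [(0 : Int)] (w * times_w))
  (PySem.List.pyRange 0 times_h 1).foldl (fun result rep_i =>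
    (PySem.List.pyRange 0 times_w 1).foldl (fun result rep_j =>
      (PySem.List.pyRange 0 h 1).foldl (fun result i =>
        (PySem.List.pyRange 0 w 1).foldl (fun result j =>
          PySem.List.pySetD result (rep_i * h + i)
            (PySem.List.pySetD (PySem.List.pyGetD result (rep_i * h + i) [])
              (rep_j * w + j)
              (PySem.List.pyGetD (PySem.List.pyGetD grid i []) j 0)))
          result)
        result)
      result)
    result

-- ===== PORT B =====
-- literal port of B: the comprehension [row[:w] * times_w for _ in range(times_h) for row in grid]
-- (a nested comprehension is a flatMap; here the outer binder is unused, so it is a map-then-flatten)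
def replicate_pattern_alt (grid : List (List Int)) (times_h : Int) (times_w : Int) : List (List Int) :=
  let w : Int := PySem.List.len ((PySem.List.pyGet? grid 0).getD [])
  ((PySem.List.pyRange 0 times_h 1).map (fun _ =>
    grid.map (fun row => PySem.List.pyRepeat (PySem.List.slice row none (some w)) times_w))).flatten

-- ===== PRECONDITION & SPEC =====
-- Pre_ excludes exactly the inputs where A raises IndexError: the empty grid (grid[0]), and grids
-- with a row shorter than row 0 when both replication counts are positive (grid[i][j] in the loops).
def Pre_replicate_pattern (grid : List (List Int)) (times_h : Int) (times_w : Int) : Prop :=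
  grid ≠ [] ∧ (0 < times_h → 0 < times_w →
    ∀ row ∈ grid, (grid.headD []).length ≤ row.length)
instance (grid : List (List Int)) (times_h : Int) (times_w : Int) : Decidable (Pre_replicate_pattern grid times_h times_w) := by unfold Pre_replicate_pattern; infer_instance

def pvWitness_replicate_pattern : List (List Int) × Int × Int := ([[1, 2], [3, 4]], 2, 3)

def Spec_replicate_pattern (grid : List (List Int)) (times_h : Int) (times_w : Int) (out : List (List Int)) : Prop := out = replicate_pattern_alt grid times_h times_w
instance (grid : List (List Int)) (times_h : Int) (times_w : Int) (out : List (List Int)) : Decidable (Spec_replicate_pattern grid times_h times_w out) := by unfold Spec_replicate_pattern; infer_instance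

-- ===== CLAIM (what is proved, stated in full; the proofs are below) =====
def Claim_equal_replicate_pattern : Prop := ∀ (grid : List (List Int)) (times_h : Int) (times_w : Int), Dom_replicate_pattern grid times_h times_w → Pre_replicate_pattern grid times_h times_w → Spec_replicate_pattern grid times_h times_w (replicate_pattern grid times_h times_w)

-- ===== LEMMAS AND PROOFS =====

lemma pv_toNat_mul (h : Nat) (t : Int) : ((h : Int) * t).toNat = h * t.toNat := by
  rcases t with n | n
  · rw [Int.ofNat_eq_natCast, ← Nat.cast_mul, Int.toNat_natCast, Int.toNat_natCast]
  · have h1 : (h : Int) * Int.negSucc n ≤ 0 :=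
      mul_nonpos_of_nonneg_of_nonpos (by positivity) (le_of_lt (Int.negSucc_lt_zero n))
    rw [Int.toNat_of_nonpos h1]
    simp

def pvApply1 (r : List (List Int)) (t : Nat × Nat × Int) : List (List Int) :=
  r.set t.1 ((r.getD t.1 []).set t.2.1 t.2.2)

def pvApplyW (ws : List (Nat × Nat × Int)) (r : List (List Int)) : List (List Int) :=
  ws.foldl pvApply1 r

lemma pv_length_pvApply1 (r : List (List Int)) (t : Nat × Nat × Int) :
    (pvApply1 r t).length = r.length := by simp [pvApply1]

lemma pv_rowlen_pvApply1 (r : List (List Int)) (t : Nat × Nat × Int) (x : Nat) :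
    ((pvApply1 r t).getD x []).length = (r.getD x []).length := by
  rcases t with ⟨a, b, v⟩
  simp only [pvApply1, List.getD_eq_getElem?_getD, List.getElem?_set]
  split_ifs with h1 h2
  · subst h1
    rw [List.getElem?_eq_getElem h2]
    simp
  · subst h1
    rw [List.getElem?_eq_none (l := r) (by omega)]
  · rfl

lemma pv_cell_pvApply1_ne (r : List (List Int)) (t : Nat × Nat × Int) (x y : Nat)
    (h : t.1 ≠ x ∨ t.2.1 ≠ y) :
    ((pvApply1 r t).getD x []).getD y 0 = (r.getD x []).getD y 0 := by
  rcases t with ⟨a, b, v⟩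
  simp only [pvApply1, List.getD_eq_getElem?_getD, List.getElem?_set]
  split_ifs with h1 h2
  · subst h1
    rw [List.getElem?_eq_getElem h2]
    have hb : b ≠ y := by simpa using h
    simp [List.getElem?_set_ne hb]
  · subst h1
    rw [List.getElem?_eq_none (l := r) (by omega)]
  · rfl

lemma pv_cell_pvApply1_eq (r : List (List Int)) (x y : Nat) (v : Int)
    (hx : x < r.length) (hy : y < (r.getD x []).length) :
    ((pvApply1 r (x, y, v)).getD x []).getD y 0 = v := by
  simp only [pvApply1, List.getD_eq_getElem?_getD]
  rw [List.getElem?_set_self (by simpa using hx)]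
  simp only [Option.getD_some]
  rw [List.getElem?_set_self (by simpa [List.getD_eq_getElem?_getD] using hy)]
  rfl

lemma pv_length_pvApplyW (ws : List (Nat × Nat × Int)) (r : List (List Int)) :
    (pvApplyW ws r).length = r.length := by
  induction ws generalizing r with
  | nil => rfl
  | cons t ws ih => rw [pvApplyW, List.foldl_cons, ← pvApplyW, ih]; simp [pvApply1]

lemma pv_rowlen_pvApplyW (ws : List (Nat × Nat × Int)) (r : List (List Int)) (x : Nat) :
    ((pvApplyW ws r).getD x []).length = (r.getD x []).length := by
  induction ws generalizing r with
  | nil => rfl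
  | cons t ws ih => rw [pvApplyW, List.foldl_cons, ← pvApplyW, ih, pv_rowlen_pvApply1]

lemma pv_cell_untouched (ws : List (Nat × Nat × Int)) (r : List (List Int)) (x y : Nat)
    (hno : ∀ t ∈ ws, t.1 ≠ x ∨ t.2.1 ≠ y) :
    ((pvApplyW ws r).getD x []).getD y 0 = ((r.getD x []).getD y 0) := by
  induction ws generalizing r with
  | nil => rfl
  | cons t ws ih =>
    rw [pvApplyW, List.foldl_cons, ← pvApplyW, ih _ (fun t ht => hno t (List.mem_cons_of_mem _ ht)),
      pv_cell_pvApply1_ne _ _ _ _ (hno t List.mem_cons_self)]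

lemma pv_cell_allSame (ws : List (Nat × Nat × Int)) (r : List (List Int)) (x y : Nat) (v : Int)
    (hx : x < r.length) (hy : y < (r.getD x []).length)
    (hex : ∃ t ∈ ws, t.1 = x ∧ t.2.1 = y)
    (hall : ∀ t ∈ ws, t.1 = x → t.2.1 = y → t.2.2 = v) :
    ((pvApplyW ws r).getD x []).getD y 0 = v := by
  induction ws generalizing r with
  | nil => simp at hex
  | cons t ws ih =>
    rw [pvApplyW, List.foldl_cons, ← pvApplyW]
    by_cases hw : ∃ t' ∈ ws, t'.1 = x ∧ t'.2.1 = y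
    · exact ih (pvApply1 r t)
        (by rw [pv_length_pvApply1]; exact hx)
        (by rw [pv_rowlen_pvApply1]; exact hy)
        hw
        (fun t' ht' => hall t' (List.mem_cons_of_mem _ ht'))
    · have htxy : t.1 = x ∧ t.2.1 = y := by
        rcases hex with ⟨t', ht', hp⟩
        rcases List.mem_cons.mp ht' with rfl | hmem
        · exact hp
        · exact absurd ⟨t', hmem, hp⟩ hw
      have hv : t.2.2 = v := hall t List.mem_cons_self htxy.1 htxy.2
      rw [pv_cell_untouched ws (pvApply1 r t) x y
        (fun t' ht' => by
          by_contra hc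
          push Not at hc
          exact hw ⟨t', ht', hc⟩)]
      obtain ⟨h1, h2⟩ := htxy
      subst h1; subst h2; subst hv
      exact pv_cell_pvApply1_eq r t.1 t.2.1 t.2.2 hx hy

def pvWrites (grid : List (List Int)) (h w TH TW : Nat) : List (Nat × Nat × Int) :=
  (List.range TH).flatMap (fun a =>
    (List.range TW).flatMap (fun b =>
      (List.range h).flatMap (fun i =>
        (List.range w).map (fun j =>
          (a * h + i, b * w + j, (grid.getD i []).getD j 0)))))

lemma pv_writes_val (grid : List (List Int)) (h w TH TW : Nat)
    (x y : Nat) (t : Nat × Nat × Int) (ht : t ∈ pvWrites grid h w TH TW)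
    (hx : t.1 = x) (hy : t.2.1 = y) :
    t.2.2 = (grid.getD (x % h) []).getD (y % w) 0 := by
  simp only [pvWrites, List.mem_flatMap, List.mem_map, List.mem_range] at ht
  obtain ⟨a, ha, b, hb, i, hi, j, hj, rfl⟩ := ht
  simp only at hx hy ⊢
  have hxi : x % h = i := by
    rw [← hx, Nat.add_comm, Nat.add_mul_mod_self_right, Nat.mod_eq_of_lt hi]
  have hyj : y % w = j := by
    rw [← hy, Nat.add_comm, Nat.add_mul_mod_self_right, Nat.mod_eq_of_lt hj]
  rw [hxi, hyj]

lemma pv_writes_mem (grid : List (List Int)) (h w TH TW : Nat)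
    (x y : Nat) (hx : x < h * TH) (hy : y < w * TW) :
    ∃ t ∈ pvWrites grid h w TH TW, t.1 = x ∧ t.2.1 = y := by
  have hh : 0 < h := Nat.pos_of_ne_zero (by rintro rfl; simp at hx)
  have hw : 0 < w := Nat.pos_of_ne_zero (by rintro rfl; simp at hy)
  refine ⟨(x / h * h + x % h, y / w * w + y % w, (grid.getD (x % h) []).getD (y % w) 0), ?_, ?_, ?_⟩
  · simp only [pvWrites, List.mem_flatMap, List.mem_map, List.mem_range]
    exact ⟨x / h, by rw [Nat.div_lt_iff_lt_mul hh, Nat.mul_comm]; exact hx,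
           y / w, by rw [Nat.div_lt_iff_lt_mul hw, Nat.mul_comm]; exact hy,
           x % h, Nat.mod_lt _ hh,
           y % w, Nat.mod_lt _ hw, rfl⟩
  · show x / h * h + x % h = x
    rw [Nat.mul_comm]; exact Nat.div_add_mod x h
  · show y / w * w + y % w = y
    rw [Nat.mul_comm]; exact Nat.div_add_mod y w

lemma pv_portA_eq (grid : List (List Int)) (times_h times_w : Int) :
    replicate_pattern grid times_h times_w =
      pvApplyW (pvWrites grid grid.length ((grid[0]?).getD []).length times_h.toNat times_w.toNat)
        (List.replicate (grid.length * times_h.toNat)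
          (List.replicate (((grid[0]?).getD []).length * times_w.toNat) 0)) := by
  simp only [replicate_pattern, pvApplyW, pvWrites, pvApply1, PySem.List.pyRange_one,
    List.foldl_flatMap, List.foldl_map, zero_add, Int.sub_zero, PySem.List.len_eq,
    PySem.List.pyGet?_zero, PySem.List.pyRepeat_singleton, ← Nat.cast_mul, ← Nat.cast_add,
    PySem.List.pySetD_natCast, PySem.List.pyGetD_natCast, pv_toNat_mul, List.map_const', Int.toNat_natCast, List.length_map, List.length_range]

lemma pv_portB_eq (grid : List (List Int)) (times_h times_w : Int) :
    replicate_pattern_alt grid times_h times_w =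
      (List.replicate times_h.toNat
        (grid.map (fun row =>
          (List.replicate times_w.toNat (row.take ((grid[0]?).getD []).length)).flatten))).flatten := by
  simp only [replicate_pattern_alt, PySem.List.pyRange_one, PySem.List.len_eq,
    PySem.List.pyGet?_zero, PySem.List.pyRepeat, PySem.List.slice_to_natCast,
    List.map_map, List.map_const', List.length_range, Int.sub_zero, Function.comp_def]

lemma pv_flatten_replicate_getD {α : Type} (d : α) (n : Nat) (L : List α) (h : Nat)
    (hlen : L.length = h) (x : Nat) (hx : x < n * h) :
    (List.replicate n L).flatten.getD x d = L.getD (x % h) d := by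
  induction n generalizing x with
  | zero => omega
  | succ n ih =>
    rw [Nat.succ_mul] at hx
    rw [List.replicate_succ, List.flatten_cons, List.getD_eq_getElem?_getD,
      List.getElem?_append, hlen]
    by_cases hxl : x < h
    · rw [if_pos hxl, ← List.getD_eq_getElem?_getD, Nat.mod_eq_of_lt hxl]
    · have hge : h ≤ x := by omega
      rw [if_neg hxl, ← List.getD_eq_getElem?_getD, ih (x - h) (by omega)]
      congr 1
      conv_rhs => rw [← Nat.sub_add_cancel hge, Nat.add_mod_right]

lemma pv_length_flatten_replicate {α : Type} (n : Nat) (L : List α) :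
    (List.replicate n L).flatten.length = n * L.length := by
  induction n with
  | zero => simp
  | succ n ih => simp [List.replicate_succ, ih]; ring

theorem pv_main (grid : List (List Int)) (times_h times_w : Int)
    (hne : grid ≠ [])
    (hrect : 0 < times_h → 0 < times_w →
      ∀ row ∈ grid, ((grid[0]?).getD []).length ≤ row.length) :
    replicate_pattern grid times_h times_w = replicate_pattern_alt grid times_h times_w := by
  rw [pv_portA_eq, pv_portB_eq]
  set h := grid.length with hh
  set w := ((grid[0]?).getD []).length with hw
  set TH := times_h.toNat with hTHdef
  set TW := times_w.toNat with hTWdef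
  set f : List Int → List Int := fun row => (List.replicate TW (row.take w)).flatten with hf
  have hhpos : 0 < h := List.length_pos_iff.mpr hne
  have hlenmap : (grid.map f).length = h := by rw [List.length_map, hh]
  have hlenL : (pvApplyW (pvWrites grid h w TH TW)
      (List.replicate (h * TH) (List.replicate (w * TW) 0))).length = h * TH := by
    rw [pv_length_pvApplyW, List.length_replicate]
  have hlenR : (List.replicate TH (grid.map f)).flatten.length = TH * h := by
    rw [pv_length_flatten_replicate, hlenmap]
  apply List.ext_getElem
  · rw [hlenL, hlenR, Nat.mul_comm]
  intro x hx1 hx2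
  have hxh : x < h * TH := by rw [hlenL] at hx1; exact hx1
  have hTH : 0 < TH := by
    rcases Nat.eq_zero_or_pos TH with h0 | hp
    · rw [h0, Nat.mul_zero] at hxh; omega
    · exact hp
  have htH : 0 < times_h := by omega
  have hxmod : x % h < h := Nat.mod_lt x hhpos
  -- the row of B at x
  have hrow : (List.replicate TH (grid.map f)).flatten.getD x [] = f grid[x % h] := by
    rw [pv_flatten_replicate_getD [] TH (grid.map f) h hlenmap x (by omega),
      List.getD_eq_getElem (grid.map f) [] (by rw [hlenmap]; exact hxmod), List.getElem_map]
  -- the row of A's initial matrix at x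
  have hinit : (List.replicate (h * TH) (List.replicate (w * TW) (0:Int))).getD x [] =
      List.replicate (w * TW) (0:Int) := by
    rw [List.getD_eq_getElem _ _ (by rw [List.length_replicate]; exact hxh),
      List.getElem_replicate]
  have hrowlenL : ((pvApplyW (pvWrites grid h w TH TW)
      (List.replicate (h * TH) (List.replicate (w * TW) 0))).getD x []).length = w * TW := by
    rw [pv_rowlen_pvApplyW, hinit, List.length_replicate]
  have hmem : grid[x % h] ∈ grid := List.getElem_mem _
  have hrowlenR : (f grid[x % h]).length = w * TW := by
    show (List.replicate TW (grid[x % h].take w)).flatten.length = w * TW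
    rw [pv_length_flatten_replicate, List.length_take]
    rcases Nat.eq_zero_or_pos TW with h0 | hTWp
    · rw [h0, Nat.mul_zero, Nat.zero_mul]
    · have htW : 0 < times_w := by omega
      rw [Nat.min_eq_left (hrect htH htW _ hmem), Nat.mul_comm]
  rw [← List.getD_eq_getElem _ [] hx1, ← List.getD_eq_getElem _ [] hx2, hrow]
  apply List.ext_getElem
  · rw [hrowlenL, hrowlenR]
  intro y hy1 hy2
  have hyw : y < w * TW := by rw [hrowlenL] at hy1; exact hy1
  have hwpos : 0 < w := by
    rcases Nat.eq_zero_or_pos w with h0 | hp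
    · rw [h0, Nat.zero_mul] at hyw; omega
    · exact hp
  have hTW : 0 < TW := by
    rcases Nat.eq_zero_or_pos TW with h0 | hp
    · rw [h0, Nat.mul_zero] at hyw; omega
    · exact hp
  have htW : 0 < times_w := by omega
  have hwle : w ≤ grid[x % h].length := hrect htH htW _ hmem
  have hymod : y % w < w := Nat.mod_lt y hwpos
  rw [← List.getD_eq_getElem _ (0:Int) hy1, ← List.getD_eq_getElem _ (0:Int) hy2]
  -- left cell
  have hcellL : ((pvApplyW (pvWrites grid h w TH TW)
        (List.replicate (h * TH) (List.replicate (w * TW) 0))).getD x []).getD y 0 =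
      (grid.getD (x % h) []).getD (y % w) 0 := by
    apply pv_cell_allSame
    · rw [List.length_replicate]; exact hxh
    · rw [hinit, List.length_replicate]; exact hyw
    · exact pv_writes_mem grid h w TH TW x y hxh hyw
    · exact fun t ht h1 h2 => pv_writes_val grid h w TH TW x y t ht h1 h2
  rw [hcellL, List.getD_eq_getElem grid [] hxmod]
  have htakelen : (grid[x % h].take w).length = w := by
    rw [List.length_take, Nat.min_eq_left hwle]
  show grid[x % h].getD (y % w) 0 = (List.replicate TW (grid[x % h].take w)).flatten.getD y 0
  rw [pv_flatten_replicate_getD (0 : Int) TW (grid[x % h].take w) w htakelen y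
      (by rw [Nat.mul_comm]; exact hyw)]
  rw [List.getD_eq_getElem _ _ (Nat.lt_of_lt_of_le hymod hwle),
    List.getD_eq_getElem _ _ (by rw [htakelen]; exact hymod)]
  exact (List.getElem_take).symm

-- ===== VERDICT (by name: the statement is the Claim_ definition above) =====
theorem replicate_pattern_spec : Claim_equal_replicate_pattern := by
  intro grid times_h times_w _hdom hpre
  unfold Spec_replicate_pattern
  obtain ⟨hne, hrect⟩ := hpre
  have hhead : grid.headD [] = (grid[0]?).getD [] := by cases grid <;> rfl
  exact pv_main grid times_h times_w hne
    (fun h1 h2 row hr => hhead ▸ hrect h1 h2 row hr)
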